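-- pv_equiv track=rewrite | github.com/alexandraback/datacollection | solutions_5738606668808192_0/Python/Wertle/C.py | coinInBase
-- ===== SOURCE A (Python) =====
-- def coinInBase(coin, base):
--     basePow = 1
--     val = 0
--     for i in range(len(coin)-1, -1, -1):
--         if coin[i]:
--             val += basePow
--         basePow *= base
--
--     return val
-- ===== SOURCE B (Python) =====
-- def coinInBase(coin, base):
--     # Horner's method: most-significant digit first, single accumulator.
--     val = 0
--     for c in coin:
--         val = val * base + (1 if c else 0)
--     return val
-- ===== Notes on version B (the rewrite author's own statement) =====
-- stated objective: idiomatic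
-- what changed: Replaces the reverse index loop with a running power of the base by a forward Horner fold (val = val*base + bit) over the digits, dropping the basePow state and the index arithmetic.
import Mathlib
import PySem

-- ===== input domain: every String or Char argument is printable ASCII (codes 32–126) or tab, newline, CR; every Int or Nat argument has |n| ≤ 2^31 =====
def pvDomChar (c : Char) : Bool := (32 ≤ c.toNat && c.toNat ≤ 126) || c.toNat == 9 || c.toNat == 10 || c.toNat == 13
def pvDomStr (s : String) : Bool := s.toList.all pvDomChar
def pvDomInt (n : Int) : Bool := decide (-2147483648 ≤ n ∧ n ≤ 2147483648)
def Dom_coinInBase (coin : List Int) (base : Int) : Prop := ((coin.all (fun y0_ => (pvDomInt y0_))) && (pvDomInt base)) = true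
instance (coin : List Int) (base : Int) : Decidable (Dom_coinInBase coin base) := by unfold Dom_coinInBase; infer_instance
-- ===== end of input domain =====

-- B replaces A's reverse index loop with running power by a forward Horner fold (idiomatic; same cost).

-- ===== PORT A =====
-- loop over range(len(coin)-1, -1, -1), state (basePow, val)
def coinInBase (coin : List Int) (base : Int) : Int :=
  let r := (PySem.List.pyRange ((coin.length : Int) - 1) (-1) (-1)).foldl
    (fun (s : Int × Int) i =>
      (s.1 * base, if PySem.List.pyGetD coin i 0 ≠ 0 then s.2 + s.1 else s.2)) (1, 0)
  r.2

-- ===== PORT B =====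
def coinInBase_alt (coin : List Int) (base : Int) : Int :=
  coin.foldl (fun v c => v * base + (if c ≠ 0 then 1 else 0)) 0

-- ===== PRECONDITION & SPEC =====
def Spec_coinInBase (coin : List Int) (base : Int) (out : Int) : Prop := out = coinInBase_alt coin base
instance (coin : List Int) (base : Int) (out : Int) : Decidable (Spec_coinInBase coin base out) := by unfold Spec_coinInBase; infer_instance

-- ===== CLAIM (what is proved, stated in full; the proofs are below) =====
def Claim_equal_coinInBase : Prop := ∀ (coin : List Int) (base : Int), Dom_coinInBase coin base → Spec_coinInBase coin base (coinInBase coin base)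

-- ===== LEMMAS AND PROOFS =====

-- A's downward index fold, started at an arbitrary state (p, v), returns v + p * (Horner value of xs).
lemma afold_spec (base : Int) (xs : List Int) (p v : Int) :
    ((PySem.List.pyRange ((xs.length : Int) - 1) (-1) (-1)).foldl
      (fun (s : Int × Int) i =>
        (s.1 * base, if PySem.List.pyGetD xs i 0 ≠ 0 then s.2 + s.1 else s.2)) (p, v)).2
    = v + p * xs.foldl (fun v c => v * base + (if c ≠ 0 then 1 else 0)) 0 := by
  induction xs using List.reverseRecOn generalizing p v with
  | nil =>
      rw [PySem.List.pyRange_neg_one_eq_nil (by norm_num)]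
      simp
  | append_singleton xs x ih =>
      have hlen : ((xs ++ [x]).length : Int) - 1 = (xs.length : Int) := by
        simp
      rw [hlen, PySem.List.pyRange_neg_one_cons (by omega)]
      simp only [List.foldl_cons]
      have hget : PySem.List.pyGetD (xs ++ [x]) (xs.length : Int) 0 = x := by
        rw [PySem.List.pyGetD_eq_getElem _ _ (by omega) (by simp)]
        simp
      rw [hget]
      have hc :
          ((PySem.List.pyRange ((xs.length : Int) - 1) (-1) (-1)).foldl
            (fun (s : Int × Int) i =>
              (s.1 * base, if PySem.List.pyGetD (xs ++ [x]) i 0 ≠ 0 then s.2 + s.1 else s.2))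
            (p * base, if x ≠ 0 then v + p else v))
          = ((PySem.List.pyRange ((xs.length : Int) - 1) (-1) (-1)).foldl
            (fun (s : Int × Int) i =>
              (s.1 * base, if PySem.List.pyGetD xs i 0 ≠ 0 then s.2 + s.1 else s.2))
            (p * base, if x ≠ 0 then v + p else v)) := by
        apply PySem.List.foldl_congr_mem
        intro acc i hi
        rw [PySem.List.mem_pyRange_neg_one] at hi
        have h0 : 0 ≤ i := by omega
        have h1 : i < (xs.length : Int) := by omega
        have hgg : PySem.List.pyGetD (xs ++ [x]) i 0 = PySem.List.pyGetD xs i 0 := by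
          rw [PySem.List.pyGetD_eq_getElem _ _ h0 (by simp; omega),
              PySem.List.pyGetD_eq_getElem _ _ h0 (by omega),
              List.getElem_append_left (by omega)]
        rw [hgg]
      rw [hc, ih]
      simp only [List.foldl_append, List.foldl_cons, List.foldl_nil]
      split_ifs <;> ring

-- ===== VERDICT (by name: the statement is the Claim_ definition above) =====
theorem coinInBase_spec : Claim_equal_coinInBase := by
  intro coin base _
  unfold Spec_coinInBase coinInBase coinInBase_alt
  simpa using afold_spec base coin 1 0
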